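-- pv_equiv track=rewrite | github.com/lyuzhuoqi/MolScanner | MolScanner/scripts/normalise_rgroup.py | _count_bare_stars
-- ===== SOURCE A (Python) =====
-- def _count_bare_stars(smiles: str) -> int:
--     """Count bare ``*`` (outside ``[…]`` brackets) in *smiles*."""
--     count = 0
--     i = 0
--     while i < len(smiles):
--         if smiles[i] == '[':
--             j = smiles.find(']', i + 1)
--             i = (j + 1) if j != -1 else (i + 1)
--         elif smiles[i] == '*':
--             count += 1
--             i += 1
--         else:
--             i += 1
--     return count
-- ===== SOURCE B (Python) =====
-- def _count_bare_stars(smiles: str) -> int: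
--     # Split on ']' : in every segment but the last, a '[' jumps to the segment's
--     # terminating ']', so only stars before the first '[' count; in the last
--     # segment any '[' is unmatched and all stars count.
--     *segs, last = smiles.split(']')
--     return sum(seg.split('[', 1)[0].count('*') for seg in segs) + last.count('*')
-- ===== Notes on version B (the rewrite author's own statement) =====
-- stated objective: alternative
-- what changed: Replaced the index-walking while-loop state machine with a split-then-sum decomposition: split the string at every closing bracket, count stars before the first opening bracket in each segment except the last, and all stars in the last (unmatched-bracket) segment.
import Mathlib
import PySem

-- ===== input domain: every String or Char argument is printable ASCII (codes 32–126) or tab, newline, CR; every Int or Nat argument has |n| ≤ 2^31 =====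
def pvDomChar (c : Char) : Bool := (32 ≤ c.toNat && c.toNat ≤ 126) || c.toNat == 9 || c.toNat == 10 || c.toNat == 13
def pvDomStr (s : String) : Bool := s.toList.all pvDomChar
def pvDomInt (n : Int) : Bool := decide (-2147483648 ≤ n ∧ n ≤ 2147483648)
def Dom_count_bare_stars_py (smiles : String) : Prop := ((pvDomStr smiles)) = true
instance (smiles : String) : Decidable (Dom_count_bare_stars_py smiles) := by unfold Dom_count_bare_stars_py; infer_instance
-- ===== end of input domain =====

-- B replaces A's index-walking while-loop by a split-at-closing-brackets-then-sum decomposition; proved equal on all inputs.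

-- ===== PORT A =====
-- The while-loop over index i, ported as structural recursion on the remaining suffix:
-- 'smiles.find("]", i + 1)' is the first ']' in the suffix after the current char (rest.idxOf? ']'),
-- and 'i = j + 1' is dropping up to and including that ']'.
def pvALoop (cs : List Char) : Int :=
  match cs with
  | [] => 0
  | c :: rest =>
    if c = '[' then
      match rest.idxOf? ']' with
      | some j => pvALoop (rest.drop (j + 1))
      | none => pvALoop rest
    else if c = '*' then 1 + pvALoop rest
    else pvALoop rest
termination_by cs.length
decreasing_by
  all_goals simp

def count_bare_stars_py (smiles : String) : Int := pvALoop smiles.toList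

-- ===== PORT B =====
-- seg.split('[', 1)[0].count('*'): stars before the first '[' of a segment
def pvSegStars (seg : List Char) : Int :=
  ((seg.takeWhile (fun c => c ≠ '[')).count '*' : Int)

-- '*segs, last = smiles.split(']')' then 'sum(… for seg in segs) + last.count("*")'
def count_bare_stars_py_alt (smiles : String) : Int :=
  let parts := smiles.toList.splitOn ']'
  (parts.dropLast.map pvSegStars).sum + ((parts.getLastD []).count '*' : Int)

-- ===== PRECONDITION & SPEC =====
def Spec_count_bare_stars_py (smiles : String) (out : Int) : Prop := out = count_bare_stars_py_alt smiles
instance (smiles : String) (out : Int) : Decidable (Spec_count_bare_stars_py smiles out) := by unfold Spec_count_bare_stars_py; infer_instance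

-- ===== CLAIM (what is proved, stated in full; the proofs are below) =====
def Claim_equal_count_bare_stars_py : Prop := ∀ (smiles : String), Dom_count_bare_stars_py smiles → Spec_count_bare_stars_py smiles (count_bare_stars_py smiles)

-- ===== LEMMAS AND PROOFS =====

-- B's value expressed on the list of split parts
def pvPartsVal (parts : List (List Char)) : Int :=
  (parts.dropLast.map pvSegStars).sum + ((parts.getLastD []).count '*' : Int)

theorem pvPartsVal_cons (s : List Char) (parts : List (List Char)) (h : parts ≠ []) :
    pvPartsVal (s :: parts) = pvSegStars s + pvPartsVal parts := by
  cases parts with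
  | nil => exact absurd rfl h
  | cons p ps =>
    simp [pvPartsVal]
    ring

-- first-occurrence decomposition of a list containing ']'
theorem exists_first_close (cs : List Char) (h : ']' ∈ cs) :
    ∃ s0 rest, cs = s0 ++ ']' :: rest ∧ ']' ∉ s0 := by
  induction cs with
  | nil => cases h
  | cons c t ih =>
    by_cases hc : c = ']'
    · exact ⟨[], t, by simp [hc], by simp⟩
    · have ht : ']' ∈ t := by
        cases List.mem_cons.mp h with
        | inl he => exact absurd he.symm hc
        | inr hm => exact hm
      obtain ⟨s0, rest, he, hn⟩ := ih ht
      refine ⟨c :: s0, rest, by simp [he], ?_⟩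
      intro hm
      cases List.mem_cons.mp hm with
      | inl he2 => exact hc he2.symm
      | inr hm2 => exact hn hm2

-- A counts every star when there is no ']'
theorem pvALoop_no_close (cs : List Char) (h : ']' ∉ cs) :
    pvALoop cs = (cs.count '*' : Int) := by
  induction cs with
  | nil => simp [pvALoop]
  | cons c rest ih =>
    have hr : ']' ∉ rest := fun hm => h (List.mem_cons_of_mem _ hm)
    have ihr := ih hr
    rw [pvALoop]
    by_cases hb : c = '['
    · have hnone : rest.idxOf? ']' = none := by
        simp [List.idxOf?_eq_none_iff, hr]
      simp [hb, hnone, ihr]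
    · by_cases hs : c = '*'
      · simp [hs, ihr]
        ring
      · simp [hb, hs, ihr]

-- the first ']' of 't ++ ']' :: rest' with ']' ∉ t
theorem idxOf_first_close (t rest : List Char) (ht : ']' ∉ t) :
    (t ++ ']' :: rest).idxOf? ']' = some t.length := by
  induction t with
  | nil => simp [List.idxOf?, List.findIdx?_cons]
  | cons d t2 ih =>
    have hd : d ≠ ']' := fun e => ht (e ▸ List.mem_cons_self)
    have ih2 := ih (fun hm => ht (List.mem_cons_of_mem _ hm))
    have step : (d :: (t2 ++ ']' :: rest)).idxOf? ']' =
        ((t2 ++ ']' :: rest).idxOf? ']').map (· + 1) := by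
      simp [List.idxOf?, List.findIdx?_cons, hd]
    rw [List.cons_append, step, ih2]
    simp

-- A on a segment closed by ']': stars before the first '[', then continue after the ']'
theorem pvALoop_seg (s0 rest : List Char) (h : ']' ∉ s0) :
    pvALoop (s0 ++ ']' :: rest) = pvSegStars s0 + pvALoop rest := by
  induction s0 with
  | nil =>
    rw [List.nil_append, pvALoop]
    simp [pvSegStars]
  | cons c t ih =>
    have ht : ']' ∉ t := fun hm => h (List.mem_cons_of_mem _ hm)
    have hc : c ≠ ']' := fun e => h (e ▸ List.mem_cons_self)
    have ih2 := ih ht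
    rw [List.cons_append, pvALoop]
    by_cases hb : c = '['
    · have hidx : (t ++ ']' :: rest).idxOf? ']' = some t.length :=
        idxOf_first_close t rest ht
      have hdrop : (t ++ ']' :: rest).drop (t.length + 1) = rest := by
        have h1 : (t ++ [']']).length = t.length + 1 := by simp
        have h2 := List.drop_left' (l₁ := t ++ [']']) (l₂ := rest) h1
        rw [List.append_assoc] at h2
        exact h2
      simp [hb, hidx, hdrop, pvSegStars]
    · by_cases hs : c = '*'
      · simp [hs, ih2, pvSegStars]
        ring
      · simp [hb, hs, ih2, pvSegStars]

theorem splitOn_no_close (cs : List Char) (h : ']' ∉ cs) :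
    cs.splitOn ']' = [cs] := by
  induction cs with
  | nil => rfl
  | cons c rest ih =>
    have hc : c ≠ ']' := fun e => h (e ▸ List.mem_cons_self)
    have ih2 : List.splitOnP (fun x => x == ']') rest = [rest] := by
      simpa [List.splitOn] using ih (fun hm => h (List.mem_cons_of_mem _ hm))
    simp [List.splitOn, List.splitOnP_cons, hc]
    rw [ih2]
    rfl

theorem splitOn_seg (s0 rest : List Char) (h : ']' ∉ s0) :
    (s0 ++ ']' :: rest).splitOn ']' = s0 :: rest.splitOn ']' := by
  induction s0 with
  | nil => simp [List.splitOn, List.splitOnP_cons]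
  | cons c t ih =>
    have hc : c ≠ ']' := fun e => h (e ▸ List.mem_cons_self)
    have ih2 := ih (fun hm => h (List.mem_cons_of_mem _ hm))
    rw [List.cons_append]
    simp [List.splitOn, List.splitOnP_cons, hc]
    simp [List.splitOn] at ih2
    rw [ih2]
    rfl

theorem splitOn_ne_nil (cs : List Char) : cs.splitOn ']' ≠ [] := by
  simpa [List.splitOn] using List.splitOnP_ne_nil (fun c => c == ']') cs

theorem pvALoop_eq_parts (cs : List Char) :
    pvALoop cs = pvPartsVal (cs.splitOn ']') := by
  by_cases h : ']' ∈ cs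
  · obtain ⟨s0, rest, he, hn⟩ := exists_first_close cs h
    have hlt : rest.length < cs.length := by
      subst he; simp; omega
    rw [he, pvALoop_seg s0 rest hn, splitOn_seg s0 rest hn,
        pvPartsVal_cons s0 _ (splitOn_ne_nil rest),
        pvALoop_eq_parts rest]
  · rw [splitOn_no_close cs h, pvALoop_no_close cs h]
    simp [pvPartsVal]
termination_by cs.length

-- ===== VERDICT (by name: the statement is the Claim_ definition above) =====
theorem count_bare_stars_py_spec : Claim_equal_count_bare_stars_py := by
  intro smiles _
  unfold Spec_count_bare_stars_py count_bare_stars_py count_bare_stars_py_alt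
  exact (pvALoop_eq_parts smiles.toList).trans rfl
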